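-- pv_equiv track=rewrite | github.com/rhkrdudrb/py | 20230513부족한금액계산하기.py | solution
-- ===== SOURCE A (Python) =====
-- def solution(price, money, count):
--     price_sum = 0
--     p = price
--     for i in range(count):
--         price_sum += p
--         p += price
--     return max(price_sum - money, 0)
--     answer = price_sum - money
--     if answer < 0:
--         answer = 0
--     return answer
-- ===== SOURCE B (Python) =====
-- def solution(price, money, count):
--     n = count if count > 0 else 0
--     return max(price * n * (n + 1) // 2 - money, 0)
-- ===== Notes on version B (the rewrite author's own statement) =====
-- stated objective: faster
-- what changed: replaces the O(count) accumulation loop by the arithmetic-series closed form price*n*(n+1)//2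
import Mathlib
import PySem

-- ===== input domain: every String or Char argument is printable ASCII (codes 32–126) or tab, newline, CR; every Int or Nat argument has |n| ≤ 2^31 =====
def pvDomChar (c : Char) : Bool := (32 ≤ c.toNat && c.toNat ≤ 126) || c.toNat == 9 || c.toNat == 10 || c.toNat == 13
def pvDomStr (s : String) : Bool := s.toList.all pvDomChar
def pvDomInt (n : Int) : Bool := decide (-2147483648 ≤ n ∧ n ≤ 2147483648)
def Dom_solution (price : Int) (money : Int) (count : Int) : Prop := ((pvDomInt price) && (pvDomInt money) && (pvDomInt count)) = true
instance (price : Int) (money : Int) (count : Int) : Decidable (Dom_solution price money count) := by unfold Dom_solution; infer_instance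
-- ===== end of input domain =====

-- B replaces A's O(count) accumulation loop with the O(1) arithmetic-series closed form (objective: faster).


-- ===== PORT A =====
-- literal transliteration of A: accumulate price_sum and p over range(count), then clamp
def solution (price : Int) (money : Int) (count : Int) : Int :=
  let st := (PySem.List.pyRange 0 count 1).foldl
    (fun st _ => (st.1 + st.2, st.2 + price)) ((0 : Int), price)
  max (st.1 - money) 0

-- ===== PORT B =====
-- literal transliteration of B: closed form price*n*(n+1)//2, n = max(count, 0)
def solution_alt (price : Int) (money : Int) (count : Int) : Int :=
  let n : Int := if count > 0 then count else 0
  max (PySem.Int.floordiv (price * n * (n + 1)) 2 - money) 0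

-- ===== PRECONDITION & SPEC =====
def Spec_solution (price : Int) (money : Int) (count : Int) (out : Int) : Prop := out = solution_alt price money count
instance (price : Int) (money : Int) (count : Int) (out : Int) : Decidable (Spec_solution price money count out) := by unfold Spec_solution; infer_instance

-- ===== CLAIM (what is proved, stated in full; the proofs are below) =====
def Claim_equal_solution : Prop := ∀ (price : Int) (money : Int) (count : Int), Dom_solution price money count → Spec_solution price money count (solution price money count)

-- ===== LEMMAS AND PROOFS =====

-- G m = 0 + 1 + ... + (m-1), as an Int
def pvG : Nat → Int
  | 0 => 0
  | m + 1 => pvG m + m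

theorem pvG_two_mul (m : Nat) : 2 * pvG m = (m : Int) * ((m : Int) - 1) := by
  induction m with
  | zero => simp [pvG]
  | succ k ih => simp [pvG]; push_cast; push_cast at ih; ring_nf; ring_nf at ih; omega

theorem pv_loop {α : Type} (price : Int) (l : List α) (s p : Int) :
    l.foldl (fun st _ => (st.1 + st.2, st.2 + price)) (s, p)
      = (s + l.length * p + price * pvG l.length, p + l.length * price) := by
  induction l generalizing s p with
  | nil => simp [pvG]
  | cons x xs ih =>
      simp only [List.foldl_cons, ih, List.length_cons, pvG]
      simp only [Prod.mk.injEq]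
      constructor <;> · push_cast; ring

theorem solution_eq (price money count : Int) :
    solution price money count = solution_alt price money count := by
  unfold solution solution_alt
  rw [PySem.List.pyRange_one]
  simp only [List.foldl_map]
  rw [pv_loop]
  have hn : (if count > 0 then count else 0) = ((count - 0).toNat : Int) := by
    split_ifs <;> omega
  rw [hn]
  set m : Nat := (count - 0).toNat with hm
  have h2 : price * (m : Int) * ((m : Int) + 1)
      = 2 * (0 + (List.range m).length * price + price * pvG (List.range m).length) := by
    simp only [List.length_range]
    linear_combination (-price) * pvG_two_mul m
  rw [h2]
  have : PySem.Int.floordiv (2 * (0 + (List.range m).length * price + price * pvG (List.range m).length)) 2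
      = 0 + (List.range m).length * price + price * pvG (List.range m).length := by
    simp [PySem.Int.floordiv, Int.mul_fdiv_cancel_left _ (by norm_num : (2:Int) ≠ 0)]
  rw [this]

-- ===== VERDICT (by name: the statement is the Claim_ definition above) =====
theorem solution_spec : Claim_equal_solution := by
  intro price money count _
  exact solution_eq price money count
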